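-- pv_equiv track=rewrite | github.com/liyown/get_bibtex | apiModels/get_bibtex_from_crossref.py | _is_doi
-- ===== SOURCE A (Python) =====
-- def _is_doi(query: str) -> bool:
--     """Check if a query is a DOI."""
--     try:
--         query = query.strip().lower()
--         # 更严格的 DOI 验证
--         parts = query.split('/')
--         return (
--             len(parts) == 2
--             and parts[0].startswith('10.')
--             and all(p.strip() for p in parts)
--         )
--     except:
--         return False
-- ===== SOURCE B (Python) =====
-- def _is_doi(query: str) -> bool:
--     """Check if a query is a DOI (one-pass state machine over the characters)."""
--     try:
--         s = query.strip().lower()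
--         slashes = 0
--         left_nonblank = False
--         right_nonblank = False
--         for ch in s:
--             if ch == '/':
--                 slashes += 1
--             elif not ch.isspace():
--                 if slashes == 0:
--                     left_nonblank = True
--                 else:
--                     right_nonblank = True
--         return slashes == 1 and left_nonblank and right_nonblank and s.startswith('10.')
--     except:
--         return False
-- ===== Notes on version B (the rewrite author's own statement) =====
-- stated objective: alternative
-- what changed: Replaces split('/') plus per-part checks with a one-pass character state machine that accumulates the slash count and non-blank flags for the text before and after the first slash, then tests the accumulated state (plus the '10.' prefix, checked on the whole string, which is equivalent once exactly one slash is required).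
import Mathlib
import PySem

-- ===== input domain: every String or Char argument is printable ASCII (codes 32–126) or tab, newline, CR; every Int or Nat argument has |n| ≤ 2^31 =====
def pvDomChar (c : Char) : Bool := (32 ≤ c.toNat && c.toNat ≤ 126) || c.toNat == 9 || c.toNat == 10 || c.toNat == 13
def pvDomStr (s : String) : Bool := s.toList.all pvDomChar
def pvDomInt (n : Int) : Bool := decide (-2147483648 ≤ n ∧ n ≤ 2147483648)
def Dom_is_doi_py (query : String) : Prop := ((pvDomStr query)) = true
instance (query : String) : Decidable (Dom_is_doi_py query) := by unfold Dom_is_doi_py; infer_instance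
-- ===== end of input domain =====

-- B replaces split('/')-and-check-parts by a one-pass character state machine accumulating
-- the slash count and non-blank flags for each side; same O(n) cost, equal return values.

-- ===== PORT A =====
-- A: query.strip().lower(); parts = query.split('/');
--    len(parts) == 2 and parts[0].startswith('10.') and all(p.strip() for p in parts)
-- (the bare except never fires for a String argument, so it is not a branch here)
def is_doi_py (query : String) : Bool :=
  let q := PySem.Str.lower (PySem.Str.strip query)
  match PySem.Str.split? q "/" with
  | none => false
  | some parts =>
      decide (parts.length = 2) &&
      PySem.Str.startswith (parts.getD 0 "") "10." &&
      parts.all (fun p => !(PySem.Str.strip p == ""))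

-- ===== PORT B =====
-- B: s = query.strip().lower(); one for-loop over the characters maintaining
--    (slashes, left_nonblank, right_nonblank), then the final test.
def doiStep (acc : Int × Bool × Bool) (ch : Char) : Int × Bool × Bool :=
  if ch = '/' then (acc.1 + 1, acc.2.1, acc.2.2)
  else if PySem.Chars.isspace ch then acc
  else if acc.1 = 0 then (acc.1, true, acc.2.2)
  else (acc.1, acc.2.1, true)

def is_doi_py_alt (query : String) : Bool :=
  let s := PySem.Str.lower (PySem.Str.strip query)
  let st := s.toList.foldl doiStep (0, false, false)
  decide (st.1 = 1) && st.2.1 && st.2.2 && PySem.Str.startswith s "10."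

-- ===== PRECONDITION & SPEC =====
def Spec_is_doi_py (query : String) (out : Bool) : Prop := out = is_doi_py_alt query
instance (query : String) (out : Bool) : Decidable (Spec_is_doi_py query out) := by unfold Spec_is_doi_py; infer_instance

-- ===== CLAIM (what is proved, stated in full; the proofs are below) =====
def Claim_equal_is_doi_py : Prop := ∀ (query : String), Dom_is_doi_py query → Spec_is_doi_py query (is_doi_py query)

-- ===== LEMMAS AND PROOFS =====

def pvPieces : List Char → List (List Char)
  | [] => [[]]
  | c :: t => if c = '/' then [] :: pvPieces t else (pvPieces t).modifyHead (c :: ·)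

lemma splitOn_go_eq : ∀ (fuel : Nat) (l cur : List Char) (acc : List (List Char)),
    l.length < fuel →
    PySem.Chars.splitOn.go ['/'] fuel l cur acc
      = acc.reverse ++ (pvPieces l).modifyHead (cur.reverse ++ ·) := by
  intro fuel
  induction fuel with
  | zero => intro l cur acc h; omega
  | succ n ih =>
      intro l cur acc h
      cases l with
      | nil =>
          simp [PySem.Chars.splitOn.go, pvPieces]
      | cons c t =>
          simp only [List.length_cons, Nat.succ_lt_succ_iff] at h
          by_cases hc : c = '/'
          · subst hc
            rw [PySem.Chars.splitOn.go]
            rw [if_pos (by simp [List.isPrefixOf])]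
            rw [ih _ _ _ (by simpa using h)]
            cases hp : pvPieces t <;> simp [pvPieces, hp]
          · rw [PySem.Chars.splitOn.go]
            rw [if_neg (by simp [List.isPrefixOf]; exact fun hh => hc hh.symm)]
            rw [ih _ _ _ h]
            cases hp : pvPieces t <;> simp [pvPieces, hp, hc]

lemma pvPieces_ne_nil (l : List Char) : pvPieces l ≠ [] := by
  cases l with
  | nil => simp [pvPieces]
  | cons c t =>
      simp only [pvPieces]
      split
      · simp
      · cases h : pvPieces t with
        | nil => exact absurd h (pvPieces_ne_nil t)
        | cons a r => simp

lemma splitOn_eq (l : List Char) : PySem.Chars.splitOn l ['/'] = pvPieces l := by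
  rw [PySem.Chars.splitOn, splitOn_go_eq _ _ _ _ (by omega)]
  cases hp : pvPieces l with
  | nil => exact absurd hp (pvPieces_ne_nil l)
  | cons a r => simp

lemma pvPieces_no_slash {l : List Char} (h : '/' ∉ l) : pvPieces l = [l] := by
  induction l with
  | nil => simp [pvPieces]
  | cons c t ih =>
      simp only [List.mem_cons, not_or] at h
      simp [pvPieces, Ne.symm h.1, ih h.2]

lemma pvPieces_split {u : List Char} (v : List Char) (h : '/' ∉ u) :
    pvPieces (u ++ '/' :: v) = u :: pvPieces v := by
  induction u with
  | nil => simp [pvPieces]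
  | cons c t ih =>
      simp only [List.mem_cons, not_or] at h
      simp [pvPieces, Ne.symm h.1, ih h.2]

lemma pvPieces_two_le {v : List Char} (h : '/' ∈ v) : 2 ≤ (pvPieces v).length := by
  induction v with
  | nil => simp at h
  | cons c t ih =>
      by_cases hc : c = '/'
      · subst hc
        have := pvPieces_ne_nil t
        simp [pvPieces]
        cases hp : pvPieces t <;> simp_all
      · have hmem : '/' ∈ t := (List.mem_cons.mp h).resolve_left (fun e => hc e.symm)
        have := ih hmem
        simp [pvPieces, hc]
        cases hp : pvPieces t <;> simp_all

lemma exists_first_slash {l : List Char} (h : '/' ∈ l) :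
    ∃ u v, l = u ++ '/' :: v ∧ '/' ∉ u := by
  induction l with
  | nil => simp at h
  | cons c t ih =>
      by_cases hc : c = '/'
      · exact ⟨[], t, by simp [hc], by simp⟩
      · have hmem : '/' ∈ t := (List.mem_cons.mp h).resolve_left (fun e => hc e.symm)
        obtain ⟨u, v, rfl, hu⟩ := ih hmem
        exact ⟨c :: u, v, by simp, by simp [Ne.symm hc, hu]⟩

lemma startswith_split (u v : List Char) :
    PySem.Chars.startswith (u ++ '/' :: v) ['1','0','.'] = PySem.Chars.startswith u ['1','0','.'] := by
  match u with
  | [] => simp [PySem.Chars.startswith, List.isPrefixOf]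
  | [a] => simp [PySem.Chars.startswith, List.isPrefixOf]
  | [a, b] => simp [PySem.Chars.startswith, List.isPrefixOf]
  | a :: b :: c :: rest => simp [PySem.Chars.startswith, List.isPrefixOf]

lemma strip_beq_empty (y : String) :
    (PySem.Str.strip y == "") = decide (PySem.Chars.strip y.toList = []) := by
  rw [Bool.beq_eq_decide_eq]
  simp only [decide_eq_decide]
  constructor
  · intro h; have := congrArg String.toList h; simpa using this
  · intro h; apply String.ext; simpa using h

-- strip l is empty exactly when l has no non-space character
lemma strip_eq_nil_iff (l : List Char) :
    PySem.Chars.strip l = [] ↔ (l.any (fun c => !(PySem.Chars.isspace c)) = false) := by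
  simp [PySem.Chars.strip, PySem.Chars.lstrip, PySem.Chars.rstrip]
  constructor
  · intro h x hx
    have hx' : x ∈ List.takeWhile PySem.Chars.isspace l ++ List.dropWhile PySem.Chars.isspace l := by
      rw [List.takeWhile_append_dropWhile]; exact hx
    rcases List.mem_append.mp hx' with h1 | h2
    · exact List.mem_takeWhile_imp h1
    · exact h x h2
  · intro h x hx
    have hx' : x ∈ List.takeWhile PySem.Chars.isspace l ++ List.dropWhile PySem.Chars.isspace l :=
      List.mem_append.mpr (Or.inr hx)
    rw [List.takeWhile_append_dropWhile] at hx'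
    exact h x hx'

lemma strip_nonempty_eq_any (y : String) :
    (!(PySem.Str.strip y == "")) = y.toList.any (fun c => !(PySem.Chars.isspace c)) := by
  rw [strip_beq_empty]
  by_cases h : PySem.Chars.strip y.toList = []
  · simp [h, (strip_eq_nil_iff y.toList).mp h]
  · have := (not_iff_not.mpr (strip_eq_nil_iff y.toList)).mp h
    simp only [Bool.not_eq_false] at this
    simp [h, this]

-- the first component of the fold counts the slashes
lemma fold_fst : ∀ (l : List Char) (st : Int × Bool × Bool),
    (l.foldl doiStep st).1 = st.1 + (l.count '/' : Int) := by
  intro l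
  induction l with
  | nil => intro st; simp
  | cons c t ih =>
      intro st
      rw [List.foldl_cons, ih]
      unfold doiStep
      split_ifs with h1 h2 h3 <;> simp [h1]; ring

-- fold over a slash-free block with slash count still 0: only the left flag can change
lemma fold_zero_no_slash : ∀ (l : List Char), '/' ∉ l → ∀ (lft r : Bool),
    l.foldl doiStep (0, lft, r) = (0, lft || l.any (fun c => !(PySem.Chars.isspace c)), r) := by
  intro l
  induction l with
  | nil => intro _ lft r; simp
  | cons c t ih =>
      intro h lft r
      simp only [List.mem_cons, not_or] at h
      have hc : ¬ c = '/' := fun hh => h.1 hh.symm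
      simp only [List.foldl_cons, doiStep, if_neg hc]
      by_cases hs : PySem.Chars.isspace c = true
      · rw [if_pos hs, ih h.2]
        simp [List.any_cons, hs]
      · rw [if_neg hs]
        simp only [if_true]
        rw [ih h.2]
        simp [List.any_cons, Bool.not_eq_true _ ▸ hs]

-- fold over a slash-free block with positive slash count: only the right flag can change
lemma fold_pos_no_slash : ∀ (l : List Char), '/' ∉ l → ∀ (sl : Int), sl ≠ 0 → ∀ (lft r : Bool),
    l.foldl doiStep (sl, lft, r) = (sl, lft, r || l.any (fun c => !(PySem.Chars.isspace c))) := by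
  intro l
  induction l with
  | nil => intro _ sl _ lft r; simp
  | cons c t ih =>
      intro h sl hsl lft r
      simp only [List.mem_cons, not_or] at h
      have hc : ¬ c = '/' := fun hh => h.1 hh.symm
      simp only [List.foldl_cons, doiStep, if_neg hc, if_neg hsl]
      by_cases hs : PySem.Chars.isspace c = true
      · rw [if_pos hs, ih h.2 sl hsl]
        simp [List.any_cons, hs]
      · rw [if_neg hs, ih h.2 sl hsl]
        simp [List.any_cons, Bool.not_eq_true _ ▸ hs]

theorem ports_agree (query : String) : is_doi_py query = is_doi_py_alt query := by
  unfold is_doi_py is_doi_py_alt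
  generalize PySem.Str.lower (PySem.Str.strip query) = s
  have hsep : ("/" : String).toList = ['/'] := by simp
  have h10 : ("10." : String).toList = ['1','0','.'] := by simp
  simp only [PySem.Str.split?, PySem.Chars.split?, hsep, List.isEmpty_cons,
    Bool.false_eq_true, if_false, splitOn_eq, Option.map_some]
  by_cases hmem : '/' ∈ s.toList
  · obtain ⟨u, v, hl, hu⟩ := exists_first_slash hmem
    rw [hl, pvPieces_split v hu, List.foldl_append]
    rw [fold_zero_no_slash u hu, List.foldl_cons]
    have hstep : doiStep (0, false || u.any (fun c => !(PySem.Chars.isspace c)), false) '/'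
        = (1, u.any (fun c => !(PySem.Chars.isspace c)), false) := by
      simp [doiStep]
    rw [hstep]
    by_cases hv : '/' ∈ v
    · -- more than one slash: both sides are false
      have h2 := pvPieces_two_le hv
      have hc1 : 1 ≤ v.count '/' := List.one_le_count_iff.mpr hv
      have hfst : ((v.foldl doiStep (1, u.any (fun c => !(PySem.Chars.isspace c)), false)).1) =
          1 + (v.count '/' : Int) := by
        rw [fold_fst]
      simp only [List.map_cons, List.length_cons, List.length_map, hfst]
      rw [decide_eq_false (by omega : ¬ (pvPieces v).length + 1 = 2),
          decide_eq_false (by omega : ¬ (1 : Int) + (v.count '/' : Int) = 1)]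
      simp
    · -- exactly one slash
      rw [pvPieces_no_slash hv]
      rw [fold_pos_no_slash v hv 1 (by omega)]
      have hsw := startswith_split u v
      simp only [List.map_cons, List.map_nil, List.length_cons, List.length_nil,
        List.getD_cons_zero, List.all_cons, List.all_nil, PySem.Str.startswith_eq, h10,
        String.toList_ofList, hl, hsw, strip_nonempty_eq_any, String.toList_ofList,
        Bool.false_or]
      simp only [decide_true, Bool.true_and, Bool.and_true]
      cases hswu : PySem.Chars.startswith u ['1','0','.'] with
      | false => simp
      | true =>
          have hpre : ['1','0','.'] <+: u := by
            have := hswu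
            simp [PySem.Chars.startswith, List.isPrefixOf_iff_prefix] at this
            exact this
          obtain ⟨t, rfl⟩ := hpre
          have hau : ((('1' :: '0' :: '.' :: t)).any (fun c => !(PySem.Chars.isspace c))) = true := by
            simp [List.any_cons]
            exact Or.inl (by decide)
          simp [hau]
  · rw [pvPieces_no_slash hmem]
    have hfst : ((s.toList.foldl doiStep (0, false, false)).1) = (0 : Int) + (s.toList.count '/' : Int) :=
      fold_fst _ _
    have hc0 : s.toList.count '/' = 0 := List.count_eq_zero.mpr hmem
    simp [hfst, hc0]

-- ===== VERDICT (by name: the statement is the Claim_ definition above) =====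
theorem is_doi_py_spec : Claim_equal_is_doi_py := by
  intro query _
  unfold Spec_is_doi_py
  exact ports_agree query
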